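-- pv_equiv track=rewrite | github.com/abhishek-h1/ailab | a.py | process_expression
-- ===== SOURCE A (Python) =====
-- def get_index_comma(string):
--     index_list = list()
--     par_count = 0
--
--     for i in range(len(string)):
--         if string[i] == ',' and par_count == 0:
--             index_list.append(i)
--         elif string[i] == '(':
--             par_count += 1
--         elif string[i] == ')':
--             par_count -= 1
--
--     return index_list
--
-- def process_expression(expr):
--     expr = expr.replace(' ', '')
--     index = None
--     for i in range(len(expr)):
--         if expr[i] == '(':
--             index = i
--             break
--     predicate_symbol = expr[:index]
--     expr = expr.replace(predicate_symbol, '')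
--     expr = expr[1:len(expr) - 1]
--     arg_list = list()
--     indices = get_index_comma(expr)
--
--     if len(indices) == 0:
--         arg_list.append(expr)
--     else:
--         arg_list.append(expr[:indices[0]])
--         for i, j in zip(indices, indices[1:]):
--             arg_list.append(expr[i + 1:j])
--         arg_list.append(expr[indices[len(indices) - 1] + 1:])
--
--     return predicate_symbol, arg_list
-- ===== SOURCE B (Python) =====
-- def process_expression(expr):
--     expr = expr.replace(' ', '')
--     index = expr.find('(')
--     predicate_symbol = expr if index == -1 else expr[:index]
--     expr = expr.replace(predicate_symbol, '')
--     expr = expr[1:len(expr) - 1]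
--     arg_list = []
--     buf = ''
--     depth = 0
--     for ch in expr:
--         if ch == ',' and depth == 0:
--             arg_list.append(buf)
--             buf = ''
--         else:
--             if ch == '(':
--                 depth += 1
--             elif ch == ')':
--                 depth -= 1
--             buf += ch
--     arg_list.append(buf)
--     return predicate_symbol, arg_list
-- ===== Notes on version B (the rewrite author's own statement) =====
-- stated objective: faster
-- what changed: The comma-index collection (get_index_comma) plus the index-arithmetic slicing passes that rebuild the arguments are replaced by a single left-to-right pass with a paren-depth counter and a token buffer that emits each argument directly.
import Mathlib
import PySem

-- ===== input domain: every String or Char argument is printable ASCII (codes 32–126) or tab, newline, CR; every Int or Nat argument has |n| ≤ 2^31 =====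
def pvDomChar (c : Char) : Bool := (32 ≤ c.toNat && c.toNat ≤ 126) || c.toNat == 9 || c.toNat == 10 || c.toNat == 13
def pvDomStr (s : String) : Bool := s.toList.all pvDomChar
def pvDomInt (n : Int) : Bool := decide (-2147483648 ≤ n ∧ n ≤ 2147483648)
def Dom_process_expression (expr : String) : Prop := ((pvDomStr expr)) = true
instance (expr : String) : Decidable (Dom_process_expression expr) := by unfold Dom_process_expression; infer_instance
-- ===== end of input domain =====

-- B keeps A's preamble (strip spaces, find '(', global replace of the predicate, strip outer
-- chars) but replaces the comma-index list + slicing with a single depth-counting tokenizer pass.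

-- ===== PORT A =====
-- helper of A: collect indices of top-level commas (loop over enumerate with (index_list, par_count) state)
def get_index_comma (string : List Char) : List Int :=
  (PySem.List.enumerate string).foldl
    (fun (st : List Int × Int) ic =>
      if ic.2 = ',' ∧ st.2 = 0 then (st.1 ++ [ic.1], st.2)
      else if ic.2 = '(' then (st.1, st.2 + 1)
      else if ic.2 = ')' then (st.1, st.2 - 1)
      else st) ([], 0) |>.1

-- A's `for i in range(len(expr)): if expr[i] == '(': index = i; break`
def findParenA : List Char → Int → Option Int
  | [], _ => none
  | c :: cs, i => if c = '(' then some i else findParenA cs (i + 1)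

def process_expression (expr : String) : String × List String :=
  let e1 := PySem.Chars.replace expr.toList [' '] []
  let index : Option Int := findParenA e1 0
  let predicate_symbol : List Char :=
    match index with
    | none => e1                                   -- expr[:None]
    | some i => PySem.List.slice e1 none (some i)  -- expr[:index]
  let e2 := PySem.Chars.replace e1 predicate_symbol []
  let e3 := PySem.List.slice e2 (some 1) (some ((e2.length : Int) - 1))
  let indices := get_index_comma e3
  let arg_list : List (List Char) :=
    if indices.length = 0 then [e3]
    else
      (PySem.List.slice e3 none (some (PySem.List.pyGetD indices 0 0))) ::
      ((indices.zip indices.tail).map (fun ij => PySem.List.slice e3 (some (ij.1 + 1)) (some ij.2))) ++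
      [PySem.List.slice e3 (some (PySem.List.pyGetD indices ((indices.length : Int) - 1) 0 + 1)) none]
  (String.mk predicate_symbol, arg_list.map String.mk)

-- ===== PORT B =====
-- step of B's single depth-counting pass ((arg_list, buf, depth) state)
def tokStep (st : List (List Char) × List Char × Int) (c : Char) : List (List Char) × List Char × Int :=
  if c = ',' ∧ st.2.2 = 0 then (st.1 ++ [st.2.1], [], st.2.2)
  else
    let d := if c = '(' then st.2.2 + 1 else if c = ')' then st.2.2 - 1 else st.2.2
    (st.1, st.2.1 ++ [c], d)

def process_expression_alt (expr : String) : String × List String :=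
  let e1 := PySem.Chars.replace expr.toList [' '] []
  let index : Int := PySem.Chars.find e1 ['(']
  let predicate_symbol := if index = -1 then e1 else PySem.List.slice e1 none (some index)
  let e2 := PySem.Chars.replace e1 predicate_symbol []
  let e3 := PySem.List.slice e2 (some 1) (some ((e2.length : Int) - 1))
  let st := e3.foldl tokStep ([], [], 0)
  let arg_list := st.1 ++ [st.2.1]
  (String.mk predicate_symbol, arg_list.map String.mk)

-- ===== PRECONDITION & SPEC =====
def Spec_process_expression (expr : String) (out : String × List String) : Prop := out = process_expression_alt expr
instance (expr : String) (out : String × List String) : Decidable (Spec_process_expression expr out) := by unfold Spec_process_expression; infer_instance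

-- ===== CLAIM (what is proved, stated in full; the proofs are below) =====
def Claim_equal_process_expression : Prop := ∀ (expr : String), Dom_process_expression expr → Spec_process_expression expr (process_expression expr)

-- ===== LEMMAS AND PROOFS =====

-- depth update shared by both loops
def updD (c : Char) (d : Int) : Int := if c = '(' then d + 1 else if c = ')' then d - 1 else d

-- reference splitter: split at top-level commas
def go : List Char → Int → List (List Char)
  | [], _ => [[]]
  | c :: cs, d =>
    if c = ',' ∧ d = 0 then [] :: go cs d
    else match go cs (updD c d) with
      | [] => [[c]]
      | t :: ts => (c :: t) :: ts

-- recursive form of get_index_comma (Nat positions, offset k)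
def gicA : List Char → Nat → Int → List Nat
  | [], _, _ => []
  | c :: cs, k, d => if c = ',' ∧ d = 0 then k :: gicA cs (k + 1) d else gicA cs (k + 1) (updD c d)

-- A's slicing construction in recursive form
def buildRest (s : List Char) : Nat → List Nat → List (List Char)
  | i, [] => [s.drop (i + 1)]
  | i, j :: rest => (s.take j).drop (i + 1) :: buildRest s j rest

def buildA (s : List Char) : List Nat → List (List Char)
  | [] => [s]
  | i :: rest => s.take i :: buildRest s i rest

theorem go_ne_nil (s : List Char) (d : Int) : go s d ≠ [] := by
  cases s with
  | nil => simp [go]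
  | cons c cs =>
    simp only [go]
    split
    · simp
    · cases h : go cs (updD c d) <;> simp

theorem gicA_foldl (s : List Char) : ∀ (k : Nat) (acc : List Int) (d : Int),
    ((PySem.List.enumerate s (k : Int)).foldl
      (fun (st : List Int × Int) ic =>
        if ic.2 = ',' ∧ st.2 = 0 then (st.1 ++ [ic.1], st.2)
        else if ic.2 = '(' then (st.1, st.2 + 1)
        else if ic.2 = ')' then (st.1, st.2 - 1)
        else st) (acc, d)).1 = acc ++ (gicA s k d).map Nat.cast := by
  induction s with
  | nil => intro k acc d; simp [PySem.List.enumerate, gicA]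
  | cons c cs ih =>
    intro k acc d
    rw [show PySem.List.enumerate (c::cs) (k:Int) = ((k:Int), c) :: PySem.List.enumerate cs ((k:Int)+1) from rfl]
    simp only [List.foldl_cons]
    by_cases hc : c = ',' ∧ d = 0
    · have h2 := ih (k+1) (acc ++ [(k:Int)]) d
      rw [show ((k+1:Nat):Int) = (k:Int)+1 by push_cast; ring] at h2
      have hstep : (if c = ',' ∧ d = 0 then (acc ++ [(k:Int)], d)
          else if c = '(' then (acc, d+1) else if c = ')' then (acc, d-1) else (acc, d)) = (acc ++ [(k:Int)], d) := by
        rw [if_pos hc]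
      rw [hstep, h2]
      simp [gicA, hc]
    · have h2 := ih (k+1) acc (updD c d)
      rw [show ((k+1:Nat):Int) = (k:Int)+1 by push_cast; ring] at h2
      have hstep : (if c = ',' ∧ d = 0 then (acc ++ [(k:Int)], d)
          else if c = '(' then (acc, d+1) else if c = ')' then (acc, d-1) else (acc, d)) = (acc, updD c d) := by
        rw [if_neg hc]; unfold updD; split_ifs <;> rfl
      rw [hstep, h2]
      simp [gicA, if_neg hc]

theorem get_index_comma_eq (s : List Char) :
    get_index_comma s = (gicA s 0 0).map Nat.cast := by
  have := gicA_foldl s 0 [] 0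
  simpa [get_index_comma] using this

theorem gicA_shift (s : List Char) : ∀ (k : Nat) (d : Int),
    gicA s k d = (gicA s 0 d).map (k + ·) := by
  induction s with
  | nil => intro k d; simp [gicA]
  | cons c cs ih =>
    intro k d
    by_cases hc : c = ',' ∧ d = 0
    · simp only [gicA, if_pos hc]
      rw [ih (k+1), ih 1, List.map_cons, List.map_map]
      refine List.cons_eq_cons.mpr ⟨by omega, List.map_congr_left fun a _ => ?_⟩
      simp only [Function.comp_apply]; omega
    · simp only [gicA, if_neg hc]
      rw [ih (k+1), ih 1, List.map_map]
      exact List.map_congr_left fun a _ => by simp only [Function.comp_apply]; omega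

theorem gicA_nil_go (s : List Char) : ∀ (k : Nat) (d : Int), gicA s k d = [] → go s d = [s] := by
  induction s with
  | nil => intro k d _; rfl
  | cons c cs ih =>
    intro k d h
    simp only [gicA] at h
    split at h
    · simp at h
    · rename_i hc
      simp only [go, if_neg hc]
      rw [ih (k+1) _ h]

theorem gicA_cons_go (s : List Char) : ∀ (d : Int) (k i : Nat) (rest : List Nat),
    gicA s k d = i :: rest →
    ∃ m : Nat, i = k + m ∧ m + 1 ≤ s.length ∧
      go s d = s.take m :: go (s.drop (m + 1)) 0 ∧
      rest = gicA (s.drop (m + 1)) (i + 1) 0 := by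
  induction s with
  | nil => intro d k i rest h; simp [gicA] at h
  | cons c cs ih =>
    intro d k i rest h
    simp only [gicA] at h
    split at h
    · rename_i hc
      have h1 : k = i := (List.cons.inj h).1
      have h2 : rest = gicA cs (k + 1) d := ((List.cons.inj h).2).symm
      refine ⟨0, by omega, by simp, ?_, ?_⟩
      · simp only [go, if_pos hc, List.take_zero, List.drop_succ_cons, List.drop_zero]
        rw [hc.2]
      · rw [h2, h1, hc.2]; simp
    · rename_i hc
      obtain ⟨m, hm1, hm2, hm3, hm4⟩ := ih (updD c d) (k+1) i rest h
      refine ⟨m + 1, by omega, by simpa using hm2, ?_, ?_⟩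
      · simp only [go, if_neg hc, hm3, List.take_succ_cons, List.drop_succ_cons]
      · simpa using hm4

theorem buildRest_shift (s : List Char) (m : Nat) :
    ∀ (a : Nat) (rel : List Nat),
    buildRest s (m + 1 + a) (rel.map (m + 1 + ·)) = buildRest (s.drop (m + 1)) a rel := by
  intro a rel
  induction rel generalizing a with
  | nil =>
    simp only [List.map_nil, buildRest, List.drop_drop]
    rw [show m + 1 + (a + 1) = m + 1 + a + 1 by omega]
  | cons b rel' ih =>
    simp only [List.map_cons, buildRest, ih b]
    congr 1
    rw [List.drop_take, List.drop_take, List.drop_drop,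
        show m + 1 + (a + 1) = m + 1 + a + 1 by omega,
        show b - (a + 1) = m + 1 + b - (m + 1 + a + 1) by omega]

theorem buildA_rec (s : List Char) (m : Nat) (rel : List Nat) :
    buildA s (m :: rel.map (m + 1 + ·)) = s.take m :: buildA (s.drop (m + 1)) rel := by
  cases rel with
  | nil => simp [buildA, buildRest]
  | cons a rel' =>
    simp only [List.map_cons, buildA, buildRest, buildRest_shift s m a rel']
    congr 2
    rw [List.drop_take]; congr 1; omega

theorem buildA_gicA_go : ∀ (n : Nat) (s : List Char), s.length ≤ n →
    buildA s (gicA s 0 0) = go s 0 := by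
  intro n
  induction n with
  | zero =>
    intro s hs
    have : s = [] := List.eq_nil_of_length_eq_zero (by omega)
    subst this; rfl
  | succ n ih =>
    intro s hs
    cases h : gicA s 0 0 with
    | nil => rw [gicA_nil_go s 0 0 h, buildA]
    | cons i rest =>
      obtain ⟨m, hm1, hm2, hm3, hm4⟩ := gicA_cons_go s 0 0 i rest h
      have hi : i = m := by omega
      rw [← hi] at hm2 hm3 hm4
      have hrest : rest = (gicA (s.drop (i + 1)) 0 0).map (i + 1 + ·) := by
        rw [hm4, gicA_shift]
      rw [hrest, buildA_rec, hm3]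
      congr 1
      exact ih (s.drop (i + 1)) (by simp; omega)

-- A's arg-list construction equals buildA
theorem pyGetD_last (l : List Nat) (h : l ≠ []) :
    PySem.List.pyGetD (l.map (Nat.cast : Nat → Int)) ((l.length : Int) - 1) 0 = (l.getLast h : Int) := by
  have hpos : 0 < l.length := List.length_pos_iff.2 h
  have h1 : ((l.length : Int) - 1) = ((l.length - 1 : Nat) : Int) := by omega
  have h2 : l.length - 1 < (l.map (Nat.cast : Nat → Int)).length := by
    simp only [List.length_map]; omega
  rw [h1, PySem.List.pyGetD_natCast, List.getD_eq_getElem _ _ h2, List.getElem_map,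
    List.getLast_eq_getElem]

theorem mids_last_eq (s : List Char) : ∀ (rest : List Nat) (i : Nat),
    ((((i :: rest).map (Nat.cast : Nat → Int)).zip ((rest).map Nat.cast)).map
        (fun ij => PySem.List.slice s (some (ij.1 + 1)) (some ij.2))) ++
      [PySem.List.slice s (some (((i :: rest).getLast (List.cons_ne_nil i rest) : Int) + 1)) none]
    = buildRest s i rest := by
  intro rest
  induction rest with
  | nil =>
    intro i
    simp only [List.map_nil, List.map_cons, List.zip_nil_right, List.getLast_singleton,
      buildRest, List.nil_append]
    rw [show ((i:Int) + 1) = ((i+1 : Nat) : Int) by push_cast; ring,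
      PySem.List.slice_from s (by positivity)]
    simp
  | cons j rest' ih =>
    intro i
    have hz : (((i :: j :: rest').map (Nat.cast : Nat → Int)).zip ((j :: rest').map Nat.cast))
        = ((i:Int), (j:Int)) :: (((j :: rest').map (Nat.cast : Nat → Int)).zip ((rest').map Nat.cast)) := by
      simp
    rw [hz, List.map_cons, List.cons_append]
    have hlast : (i :: j :: rest').getLast (List.cons_ne_nil _ _) = (j :: rest').getLast (List.cons_ne_nil _ _) := by
      simp [List.getLast_cons]
    rw [hlast, ih j]
    simp only [buildRest]
    congr 1
    rw [show ((i:Int) + 1) = ((i+1 : Nat) : Int) by push_cast; ring,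
        PySem.List.slice_natCast s (i+1) j, List.drop_take]

theorem argsA_eq_buildA (s : List Char) (idxs : List Nat) :
    (if ((idxs.map (Nat.cast : Nat → Int)).length = 0) then [s]
     else
      (PySem.List.slice s none (some (PySem.List.pyGetD (idxs.map Nat.cast) 0 0))) ::
      (((idxs.map (Nat.cast : Nat → Int)).zip (idxs.map (Nat.cast : Nat → Int)).tail).map
          (fun ij => PySem.List.slice s (some (ij.1 + 1)) (some ij.2))) ++
      [PySem.List.slice s
        (some (PySem.List.pyGetD (idxs.map Nat.cast) (((idxs.map (Nat.cast : Nat → Int)).length : Int) - 1) 0 + 1)) none])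
    = buildA s idxs := by
  cases idxs with
  | nil => simp [buildA]
  | cons i rest =>
    rw [if_neg (by simp)]
    have h0 : PySem.List.pyGetD ((i :: rest).map (Nat.cast : Nat → Int)) 0 0 = (i : Int) := by
      have := PySem.List.pyGetD_natCast ((i :: rest).map (Nat.cast : Nat → Int)) 0 0
      simpa using this
    have hlen : ((((i :: rest).map (Nat.cast : Nat → Int)).length : Int)) = (((i :: rest).length : Int)) := by simp
    rw [h0, hlen, pyGetD_last (i :: rest) (List.cons_ne_nil _ _)]
    have htail : ((i :: rest).map (Nat.cast : Nat → Int)).tail = rest.map Nat.cast := by simp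
    rw [htail, PySem.List.slice_to s (by positivity)]
    simp only [Int.toNat_natCast, buildA]
    rw [← mids_last_eq s rest i]
    simp

-- B's tokenizer equals go
def withFirst (b : List Char) : List (List Char) → List (List Char)
  | [] => [b]
  | t :: ts => (b ++ t) :: ts

theorem tok_go (s : List Char) : ∀ (args : List (List Char)) (buf : List Char) (d : Int),
    (s.foldl tokStep (args, buf, d)).1 ++ [(s.foldl tokStep (args, buf, d)).2.1]
      = args ++ withFirst buf (go s d) := by
  induction s with
  | nil => intro args buf d; simp [go, withFirst]
  | cons c cs ih =>
    intro args buf d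
    rw [List.foldl_cons]
    by_cases hc : c = ',' ∧ d = 0
    · have hstep : tokStep (args, buf, d) c = (args ++ [buf], [], d) := by
        simp [tokStep, hc]
      rw [hstep, ih (args ++ [buf]) [] d]
      cases h : go cs d with
      | nil => exact absurd h (go_ne_nil cs d)
      | cons t ts =>
        simp only [go, if_pos hc, h, withFirst]
        simp
    · have hstep : tokStep (args, buf, d) c = (args, buf ++ [c], updD c d) := by
        simp only [tokStep, if_neg hc, updD]
      rw [hstep, ih args (buf ++ [c]) (updD c d)]
      cases h : go cs (updD c d) with
      | nil => exact absurd h (go_ne_nil cs (updD c d))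
      | cons t ts =>
        simp only [go, if_neg hc, h, withFirst]
        simp

-- find-the-first-'(' agreement
theorem findParenA_none (s : List Char) : ∀ k, '(' ∉ s → findParenA s k = none := by
  induction s with
  | nil => intro k _; rfl
  | cons c cs ih =>
    intro k h
    simp only [List.mem_cons, not_or] at h
    have hc : ¬ (c = '(') := fun e => h.1 e.symm
    simp only [findParenA, if_neg hc]
    exact ih (k+1) h.2

theorem findParenA_some (s : List Char) : ∀ (k : Int) (n : Nat),
    s[n]? = some '(' → (∀ i < n, s[i]? ≠ some '(') → findParenA s k = some (k + n) := by
  induction s with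
  | nil => intro k n h _; simp at h
  | cons c cs ih =>
    intro k n h hmin
    by_cases hc : c = '('
    · have hn : n = 0 := by
        by_contra hn0
        exact hmin 0 (by omega) (by simpa using hc)
      subst hn
      simp [findParenA, hc]
    · have hn : n ≠ 0 := by
        intro h0; subst h0; simp at h; exact hc h
      obtain ⟨n', rfl⟩ := Nat.exists_eq_succ_of_ne_zero hn
      simp only [findParenA, if_neg hc]
      rw [ih (k+1) n' (by simpa using h) (fun i hi => by simpa using hmin (i+1) (by omega))]
      congr 1; push_cast; ring

theorem prefix_singleton_iff (a : Char) (l : List Char) : [a] <+: l ↔ l.head? = some a := by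
  constructor
  · rintro ⟨t, rfl⟩; rfl
  · intro h
    cases l with
    | nil => simp at h
    | cons x xs => simp at h; subst h; exact ⟨xs, rfl⟩

theorem find_paren_agree (s : List Char) :
    findParenA s 0 = (if PySem.Chars.find s ['('] = -1 then none else some (PySem.Chars.find s ['('])) := by
  by_cases h : PySem.Chars.find s ['('] = -1
  · rw [if_pos h]
    have hmem : '(' ∉ s := by
      have := (PySem.Chars.find_eq_neg_one_iff s ['(']).1 h
      intro hm
      exact this ((List.singleton_infix_iff '(' s).2 hm)
    exact findParenA_none s 0 hmem
  · rw [if_neg h]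
    have hpos : 0 ≤ PySem.Chars.find s ['('] := by
      have := PySem.Chars.neg_one_le_find s ['(']
      omega
    obtain ⟨hpre, hmin⟩ := PySem.Chars.find_spec hpos
    set n := (PySem.Chars.find s ['(']).toNat with hn
    have h1 : s[n]? = some '(' := by
      have := (prefix_singleton_iff '(' (s.drop n)).1 hpre
      rwa [List.head?_drop] at this
    have h2 : ∀ i < n, s[i]? ≠ some '(' := by
      intro i hi hcontra
      exact hmin i hi ((prefix_singleton_iff '(' (s.drop i)).2 (by rwa [List.head?_drop]))
    have := findParenA_some s 0 n h1 h2
    rw [this]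
    congr 1
    omega

theorem args_eq (s : List Char) :
    (s.foldl tokStep ([], [], 0)).1 ++ [(s.foldl tokStep ([], [], 0)).2.1]
    = (if (get_index_comma s).length = 0 then [s]
       else
        (PySem.List.slice s none (some (PySem.List.pyGetD (get_index_comma s) 0 0))) ::
        (((get_index_comma s).zip (get_index_comma s).tail).map
            (fun ij => PySem.List.slice s (some (ij.1 + 1)) (some ij.2))) ++
        [PySem.List.slice s
          (some (PySem.List.pyGetD (get_index_comma s) (((get_index_comma s).length : Int) - 1) 0 + 1)) none]) := by
  rw [tok_go s [] [] 0, List.nil_append]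
  have hB : withFirst [] (go s 0) = go s 0 := by
    cases hgo : go s 0 with
    | nil => exact absurd hgo (go_ne_nil s 0)
    | cons t ts => simp [withFirst]
  rw [hB, get_index_comma_eq, argsA_eq_buildA s (gicA s 0 0),
    buildA_gicA_go s.length s le_rfl]

-- ===== VERDICT (by name: the statement is the Claim_ definition above) =====
theorem process_expression_spec : Claim_equal_process_expression := by
  intro expr _
  unfold Spec_process_expression
  simp only [process_expression, process_expression_alt]
  rw [find_paren_agree]
  by_cases h : PySem.Chars.find (PySem.Chars.replace expr.toList [' '] []) ['('] = -1
  · simp only [if_pos h]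
    rw [← args_eq]
  · simp only [if_neg h]
    rw [← args_eq]
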